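-- pv_equiv track=rewrite | github.com/Ausp3x/Competitive-Programming | [3] Ateneo ProgVar/2025 UP ACM Algolympics Final Round/K. Polynomial Construction.py | getCoef
-- ===== SOURCE A (Python) =====
-- def getCoef(R: list):
--     n = len(R)
--     for i in range(n):
--         R[i] = -R[i]
--
--     res = [0 for _ in range(n + 1)]
--     for msk in range(0, 1 << n):
--         cnt, cur = 0, 1
--         for i in range(0, n):
--             if msk & (1 << i):
--                 cnt += 1
--                 cur *= R[i]
--
--         res[cnt] += cur
--
--     res.reverse()
--
--     return res
-- ===== SOURCE B (Python) =====
-- def getCoef(R: list):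
--     # O(n^2): multiply by (x - r) one root at a time, coefficients in increasing power order.
--     # (Does not mutate R; equivalence with A is about the return value only.)
--     coef = [1]
--     for r in R:
--         coef = [a - r * b for a, b in zip([0] + coef, coef + [0])]
--     return coef
-- ===== Notes on version B (the rewrite author's own statement) =====
-- stated objective: faster
-- what changed: Replaces the O(2^n * n) enumeration of all root subsets (bitmask loop accumulating subset products by popcount) with O(n^2) iterative polynomial multiplication: multiply the coefficient list by (x - r) once per root.
import Mathlib
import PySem

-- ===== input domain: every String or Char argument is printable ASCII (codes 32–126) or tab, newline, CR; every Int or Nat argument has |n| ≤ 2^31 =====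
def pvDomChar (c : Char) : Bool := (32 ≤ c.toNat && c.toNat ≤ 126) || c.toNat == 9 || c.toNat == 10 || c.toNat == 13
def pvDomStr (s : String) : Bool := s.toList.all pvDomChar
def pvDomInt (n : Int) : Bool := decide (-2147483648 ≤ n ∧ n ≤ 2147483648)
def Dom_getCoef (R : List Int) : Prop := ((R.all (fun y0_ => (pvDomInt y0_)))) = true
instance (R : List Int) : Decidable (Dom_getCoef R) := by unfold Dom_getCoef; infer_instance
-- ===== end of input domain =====

-- B replaces A's O(2^n·n) subset enumeration by O(n^2) iterative multiplication by (x - r);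
-- A mutates its argument in place (negates entries), B does not: equivalence is about the return value.

-- ===== PORT A =====
def getCoef (R : List Int) : List Int :=
  let R' := R.map (fun x => -x)              -- for i in range(n): R[i] = -R[i]
  let n := R'.length
  let res : List Int := List.replicate (n + 1) 0
  let res := (List.range (2 ^ n)).foldl
    (fun res msk =>
      let p := (List.range n).foldl
        (fun (p : Nat × Int) i =>
          if msk.testBit i then (p.1 + 1, p.2 * (R'.getD i 0)) else p)
        (0, 1)
      res.set p.1 (res.getD p.1 0 + p.2))
    res
  res.reverse

-- ===== PORT B =====
def getCoef_alt (R : List Int) : List Int :=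
  R.foldl (fun coef r =>
      (List.zip (0 :: coef) (coef ++ [0])).map (fun q => q.1 - r * q.2))
    [1]

-- ===== PRECONDITION & SPEC =====
def Spec_getCoef (R : List Int) (out : List Int) : Prop := out = getCoef_alt R
instance (R : List Int) (out : List Int) : Decidable (Spec_getCoef R out) := by unfold Spec_getCoef; infer_instance

-- ===== CLAIM (what is proved, stated in full; the proofs are below) =====
def Claim_equal_getCoef : Prop := ∀ (R : List Int), Dom_getCoef R → Spec_getCoef R (getCoef R)

-- ===== LEMMAS AND PROOFS =====

-- A's inner loop over the first n bits of msk
def ccn (Q : List Int) (m n : Nat) : Nat × Int :=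
  (List.range n).foldl
    (fun (p : Nat × Int) i =>
      if m.testBit i then (p.1 + 1, p.2 * (Q.getD i 0)) else p)
    (0, 1)

-- A's accumulator loop over all masks, before the reverse
def pvResA (Q : List Int) : List Int :=
  (List.range (2 ^ Q.length)).foldl
    (fun res msk =>
      let p := ccn Q msk Q.length
      res.set p.1 (res.getD p.1 0 + p.2))
    (List.replicate (Q.length + 1) 0)

-- the coefficient sum A computes at count k
def pvS (Q : List Int) (k : Nat) : Int :=
  ((List.range (2 ^ Q.length)).map
    (fun m => if (ccn Q m Q.length).1 = k then (ccn Q m Q.length).2 else 0)).sum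

-- B's one multiplication step
def pvStep (r : Int) (p : List Int) : List Int :=
  (List.zip (0 :: p) (p ++ [0])).map (fun q => q.1 - r * q.2)

-- basic unfolding of one bit step
theorem ccn_succ (Q : List Int) (m n : Nat) :
    ccn Q m (n+1) =
      (if m.testBit n then ((ccn Q m n).1 + 1, (ccn Q m n).2 * (Q.getD n 0)) else ccn Q m n) := by
  simp [ccn, List.range_succ]

theorem ccn_fst_le (Q : List Int) (m n : Nat) : (ccn Q m n).1 ≤ n := by
  induction n with
  | zero => simp [ccn]
  | succ k ih =>
    rw [ccn_succ]
    split <;> omega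

theorem ccn_ext (Q Q' : List Int) (m m' : Nat) :
    ∀ n, (∀ i, i < n → Q.getD i 0 = Q'.getD i 0) →
      (∀ i, i < n → m.testBit i = m'.testBit i) → ccn Q m n = ccn Q' m' n := by
  intro n
  induction n with
  | zero => intro _ _; rfl
  | succ k ih =>
    intro hq hb
    rw [ccn_succ, ccn_succ, ih (fun i hi => hq i (by omega)) (fun i hi => hb i (by omega)),
      hq k (by omega), hb k (by omega)]

theorem ccn_low (Q : List Int) (s : Int) (m n : Nat) (hQ : Q.length = n) (hm : m < 2^n) :
    ccn (Q ++ [s]) m (n+1) = ccn Q m n := by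
  rw [ccn_succ, Nat.testBit_lt_two_pow hm]
  simp only [if_neg Bool.false_ne_true]
  exact ccn_ext _ _ _ _ n
    (fun i hi => by rw [List.getD_append _ _ _ _ (by omega)])
    (fun _ _ => rfl)

theorem testBit_high (n m : Nat) (h : m < 2^n) : (2^n + m).testBit n = true := by
  rw [Nat.testBit, Nat.shiftRight_eq_div_pow]
  have h1 : (2^n + m) / 2^n = 1 := by
    rw [Nat.add_comm, Nat.add_div_right _ (Nat.two_pow_pos n), Nat.div_eq_of_lt h]
  simp [h1]

theorem ccn_high (Q : List Int) (s : Int) (m n : Nat) (hQ : Q.length = n) (hm : m < 2^n) :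
    ccn (Q ++ [s]) (2^n + m) (n+1) = ((ccn Q m n).1 + 1, (ccn Q m n).2 * s) := by
  rw [ccn_succ, testBit_high n m hm]
  have hg : (Q ++ [s]).getD n 0 = s := by
    subst hQ
    simp
  rw [if_pos rfl, hg,
    ccn_ext (Q ++ [s]) Q (2^n + m) m n
      (fun i hi => by rw [List.getD_append _ _ _ _ (by omega)])
      (fun i hi => Nat.testBit_two_pow_add_gt hi m)]

-- length invariant of the accumulating fold
theorem foldl_set_length (Q : List Int) (L : List Nat) :
    ∀ (res : List Int),
      (L.foldl (fun res msk =>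
        let p := ccn Q msk Q.length
        res.set p.1 (res.getD p.1 0 + p.2)) res).length = res.length := by
  induction L with
  | nil => intro res; rfl
  | cons a t ih => intro res; rw [List.foldl_cons, ih]; simp

-- accumulation: the fold adds, at index k, the sum of products of masks with count k
theorem foldl_set_getD (Q : List Int) (L : List Nat) :
    ∀ (res : List Int), (∀ m ∈ L, (ccn Q m Q.length).1 < res.length) → ∀ k,
      (L.foldl (fun res msk =>
        let p := ccn Q msk Q.length
        res.set p.1 (res.getD p.1 0 + p.2)) res).getD k 0 =
      res.getD k 0 +
        (L.map (fun m => if (ccn Q m Q.length).1 = k then (ccn Q m Q.length).2 else 0)).sum := by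
  induction L with
  | nil => intro res _ k; simp
  | cons a t ih =>
    intro res hlt k
    have ha := hlt a (by simp)
    rw [List.foldl_cons, ih _ (by
      intro m hm
      have := hlt m (by simp [hm])
      simpa using this) k]
    simp only [List.map_cons, List.sum_cons]
    have hset : (res.set (ccn Q a Q.length).1 (res.getD (ccn Q a Q.length).1 0 + (ccn Q a Q.length).2)).getD k 0
        = res.getD k 0 + (if (ccn Q a Q.length).1 = k then (ccn Q a Q.length).2 else 0) := by
      by_cases hk : (ccn Q a Q.length).1 = k
      · subst hk
        rw [if_pos rfl, List.getD_eq_getElem _ _ (by simpa using ha),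
          List.getElem_set_self, List.getD_eq_getElem _ _ ha]
      · rw [if_neg hk, List.getD]
        rw [List.getElem?_set_ne hk]
        simp [List.getD]
    rw [hset]
    ring

theorem pvResA_length (Q : List Int) : (pvResA Q).length = Q.length + 1 := by
  rw [pvResA, foldl_set_length]; simp

theorem pvResA_getD (Q : List Int) (k : Nat) : (pvResA Q).getD k 0 = pvS Q k := by
  rw [pvResA, pvS, foldl_set_getD Q _ _ (by
    intro m hm
    simp only [List.length_replicate]
    exact Nat.lt_succ_of_le (ccn_fst_le Q m Q.length))]
  simp

theorem pvS_gt (Q : List Int) (k : Nat) (h : Q.length < k) : pvS Q k = 0 := by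
  rw [pvS]
  have : ∀ m ∈ List.range (2^Q.length),
      (if (ccn Q m Q.length).1 = k then (ccn Q m Q.length).2 else 0) = 0 := by
    intro m _
    rw [if_neg]
    have := ccn_fst_le Q m Q.length
    omega
  rw [List.map_congr_left this]
  simp

theorem pvS_snoc (Q : List Int) (s : Int) (k : Nat) :
    pvS (Q ++ [s]) k = pvS Q k + (if k = 0 then 0 else s * pvS Q (k-1)) := by
  have hlen : (Q ++ [s]).length = Q.length + 1 := by simp
  have hpow : 2^(Q.length+1) = 2^Q.length + 2^Q.length := by ring
  rw [pvS, hlen, hpow, List.range_add, List.map_append, List.sum_append, List.map_map]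
  congr 1
  · rw [pvS]
    refine congrArg _ (List.map_congr_left ?_)
    intro m hm
    rw [ccn_low Q s m Q.length rfl (List.mem_range.mp hm)]
  · by_cases hk : k = 0
    · subst hk
      have : ∀ m ∈ List.range (2^Q.length),
          ((fun m => if (ccn (Q ++ [s]) m (Q.length+1)).1 = 0 then (ccn (Q ++ [s]) m (Q.length+1)).2 else 0) ∘
            (fun x => 2^Q.length + x)) m = 0 := by
        intro m hm
        simp only [Function.comp]
        rw [ccn_high Q s m Q.length rfl (List.mem_range.mp hm), if_neg (by omega)]
      rw [List.map_congr_left this]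
      simp
    · rw [if_neg hk, pvS, ← List.sum_map_mul_left]
      refine congrArg _ (List.map_congr_left ?_)
      intro m hm
      simp only [Function.comp]
      rw [ccn_high Q s m Q.length rfl (List.mem_range.mp hm)]
      by_cases hc : (ccn Q m Q.length).1 = k - 1
      · rw [if_pos (by omega), if_pos hc]; ring
      · rw [if_neg (by omega), if_neg hc]; ring

theorem pvStep_length (r : Int) (p : List Int) : (pvStep r p).length = p.length + 1 := by
  simp [pvStep]

theorem pvResA_snoc (Q : List Int) (s : Int) :
    (pvResA (Q ++ [s])).reverse = pvStep (-s) (pvResA Q).reverse := by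
  have hA : (pvResA (Q ++ [s])).length = Q.length + 2 := by
    rw [pvResA_length]; simp
  have hB : (pvResA Q).length = Q.length + 1 := pvResA_length Q
  refine List.ext_getElem (by rw [List.length_reverse, hA, pvStep_length, List.length_reverse, hB]) ?_
  intro j h1 h2
  rw [List.length_reverse, hA] at h1
  set n := Q.length with hn
  have hLHS : (pvResA (Q ++ [s])).reverse[j] = pvS (Q ++ [s]) (n + 1 - j) := by
    rw [List.getElem_reverse, ← List.getD_eq_getElem _ 0, pvResA_getD]
    congr 1
    rw [hA]
    omega
  rw [hLHS, pvS_snoc]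
  -- RHS
  have hz : (pvStep (-s) (pvResA Q).reverse)[j] =
      ((0 :: (pvResA Q).reverse).getD j 0) + s * (((pvResA Q).reverse ++ [0]).getD j 0) := by
    simp only [pvStep, List.getElem_map, List.getElem_zip]
    rw [List.getD_eq_getElem _ _ (by simp [hB]; omega),
        List.getD_eq_getElem _ _ (by simp [hB]; omega)]
    ring
  rw [hz]
  have hq : ∀ i, i < n + 1 → (pvResA Q).reverse.getD i 0 = pvS Q (n - i) := by
    intro i hi
    rw [List.getD_eq_getElem _ _ (by simp [hB]; omega), List.getElem_reverse,
      ← List.getD_eq_getElem _ 0, pvResA_getD]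
    congr 1
    rw [hB]
    omega
  have hc : ((0 :: (pvResA Q).reverse).getD j 0) = pvS Q (n + 1 - j) := by
    match j with
    | 0 => simpa using (pvS_gt Q (n+1) (by omega)).symm
    | Nat.succ i =>
      simp only [List.getD_cons_succ]
      rw [hq i (by omega)]
      congr 1
      omega
  rw [hc]
  by_cases hj : j < n + 1
  · have : (((pvResA Q).reverse ++ [0]).getD j 0) = pvS Q (n - j) := by
      rw [List.getD_append _ _ _ _ (by simp [hB]; omega)]
      exact hq j hj
    rw [this, if_neg (by omega)]
    have harith : n + 1 - j - 1 = n - j := by omega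
    rw [harith]
  · have hj' : j = n + 1 := by omega
    subst hj'
    have : (((pvResA Q).reverse ++ [0]).getD (n+1) 0) = 0 := by
      rw [List.getD_eq_getElem _ _ (by simp [hB])]
      simp [hB]
    rw [this, if_pos (by omega)]
    simp

theorem alt_snoc (R : List Int) (r : Int) :
    getCoef_alt (R ++ [r]) =
      (List.zip (0 :: getCoef_alt R) (getCoef_alt R ++ [0])).map (fun q => q.1 - r * q.2) := by
  simp [getCoef_alt, List.foldl_append]

theorem main_eq (R : List Int) : getCoef_alt R = (pvResA (R.map (fun x => -x))).reverse := by
  induction R using List.reverseRecOn with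
  | nil => rfl
  | append_singleton R r ih =>
    rw [alt_snoc, ih, List.map_append]
    show _ = (pvResA (R.map (fun x => -x) ++ [-r])).reverse
    rw [pvResA_snoc, neg_neg]
    rfl

theorem getCoef_eq (R : List Int) : getCoef R = (pvResA (R.map (fun x => -x))).reverse := rfl

-- ===== VERDICT (by name: the statement is the Claim_ definition above) =====
theorem getCoef_spec : Claim_equal_getCoef := by
  intro R _
  show getCoef R = getCoef_alt R
  rw [getCoef_eq, main_eq]
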